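-- pv_equiv track=rewrite | github.com/ait-aecid/aecid-alert-aggregation | clustering/time_delta_group.py | get_group_indices
-- ===== SOURCE A (Python) =====
-- def get_group_indices(timestamps, group_times):
--   group_indices = []
--   for group_time in group_times:
--     group_indices.append([])
--   i = 0
--   for ts in timestamps:
--     j = 0
--     for group_time in group_times:
--       # Alert could be part of multiple groups
--       if ts >= group_time[0] and ts <= group_time[1]:
--         group_indices[j].append(i)
--       j += 1
--     i += 1
--
--   return group_indices
-- ===== SOURCE B (Python) =====
-- def get_group_indices(timestamps, group_times):
--     return [[i for i, ts in enumerate(timestamps) if lo <= ts <= hi]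
--             for lo, hi in group_times]
-- ===== Notes on version B (the rewrite author's own statement) =====
-- stated objective: simpler
-- what changed: B builds the output group-by-group with one comprehension per group (traversal order swapped: per-group scan of timestamps) instead of maintaining m parallel accumulator lists mutated inside a nested loop over timestamps.
import Mathlib
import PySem

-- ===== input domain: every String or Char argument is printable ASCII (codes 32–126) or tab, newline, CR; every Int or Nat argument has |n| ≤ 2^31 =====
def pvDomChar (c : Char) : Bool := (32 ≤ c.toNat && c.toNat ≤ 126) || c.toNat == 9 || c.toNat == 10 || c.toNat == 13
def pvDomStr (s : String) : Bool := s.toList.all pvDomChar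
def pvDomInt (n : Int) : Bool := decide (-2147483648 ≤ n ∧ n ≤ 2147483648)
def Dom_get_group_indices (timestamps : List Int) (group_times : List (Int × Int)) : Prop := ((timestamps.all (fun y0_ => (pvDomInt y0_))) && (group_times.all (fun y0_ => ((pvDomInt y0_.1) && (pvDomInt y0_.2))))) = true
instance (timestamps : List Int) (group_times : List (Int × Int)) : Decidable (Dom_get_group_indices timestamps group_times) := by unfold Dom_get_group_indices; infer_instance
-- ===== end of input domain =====

-- B builds the output group-by-group (one filtered scan of timestamps per group) instead of
-- A's nested loop over timestamps that mutates m parallel accumulator lists; return values proved equal.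

-- ===== PORT A =====
-- inner 'for group_time in group_times' loop: j indexes into group_indices, appended to at j when ts is in the interval
def pvInnerA (ts i : Int) (gts : List (Int × Int)) (gs : List (List Int)) (j : Nat) : List (List Int) :=
  match gts with
  | [] => gs
  | gt :: rest =>
      pvInnerA ts i rest
        (if ts ≥ gt.1 ∧ ts ≤ gt.2 then gs.set j (gs.getD j [] ++ [i]) else gs) (j + 1)

-- outer 'for ts in timestamps' loop with counter i
def pvOuterA (tss : List Int) (gts : List (Int × Int)) (gs : List (List Int)) (i : Int) : List (List Int) :=
  match tss with
  | [] => gs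
  | ts :: rest => pvOuterA rest gts (pvInnerA ts i gts gs 0) (i + 1)

def get_group_indices (timestamps : List Int) (group_times : List (Int × Int)) : List (List Int) :=
  pvOuterA timestamps group_times (group_times.map (fun _ => [])) 0

-- ===== PORT B =====
-- '[i for i, ts in enumerate(timestamps) if lo <= ts <= hi]'
def pvRowB (tss : List Int) (i lo hi : Int) : List Int :=
  match tss with
  | [] => []
  | ts :: rest => if lo ≤ ts ∧ ts ≤ hi then i :: pvRowB rest (i + 1) lo hi else pvRowB rest (i + 1) lo hi

def get_group_indices_alt (timestamps : List Int) (group_times : List (Int × Int)) : List (List Int) :=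
  group_times.map (fun gt => pvRowB timestamps 0 gt.1 gt.2)

-- ===== PRECONDITION & SPEC =====
def Spec_get_group_indices (timestamps : List Int) (group_times : List (Int × Int)) (out : List (List Int)) : Prop := out = get_group_indices_alt timestamps group_times
instance (timestamps : List Int) (group_times : List (Int × Int)) (out : List (List Int)) : Decidable (Spec_get_group_indices timestamps group_times out) := by unfold Spec_get_group_indices; infer_instance

-- ===== CLAIM (what is proved, stated in full; the proofs are below) =====
def Claim_equal_get_group_indices : Prop := ∀ (timestamps : List Int) (group_times : List (Int × Int)), Dom_get_group_indices timestamps group_times → Spec_get_group_indices timestamps group_times (get_group_indices timestamps group_times)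

-- ===== LEMMAS AND PROOFS =====

-- one inner pass appends i to exactly the slots whose interval contains ts
theorem pvInnerA_zip (ts i : Int) :
    ∀ (gts : List (Int × Int)) (pre gs' : List (List Int)), gs'.length = gts.length →
    pvInnerA ts i gts (pre ++ gs') pre.length =
      pre ++ List.zipWith (fun gt g => if ts ≥ gt.1 ∧ ts ≤ gt.2 then g ++ [i] else g) gts gs' := by
  intro gts
  induction gts with
  | nil => intro pre gs' h; simp at h; simp [pvInnerA, h]
  | cons gt rest ih =>
      intro pre gs' h
      cases gs' with
      | nil => simp at h
      | cons g gs'' =>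
          simp [pvInnerA]
          by_cases hc : ts ≥ gt.1 ∧ ts ≤ gt.2
          · simp only [hc]
            have := ih (pre ++ [g ++ [i]]) gs'' (by simpa using h)
            simpa [List.append_assoc] using this
          · simp only [hc, if_false]
            have := ih (pre ++ [g]) gs'' (by simpa using h)
            simpa [List.append_assoc] using this

theorem zipWith_nilray : ∀ (gts : List (Int × Int)) (gs : List (List Int)), gs.length = gts.length →
    List.zipWith (fun (_ : Int × Int) (g : List Int) => g ++ ([] : List Int)) gts gs = gs := by
  intro gts
  induction gts with
  | nil => intro gs h; simp at h; simp [h]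
  | cons gt rest ih =>
      intro gs h
      cases gs with
      | nil => simp at h
      | cons g gs' =>
          simp only [List.length_cons, Nat.add_right_cancel_iff] at h
          have := ih gs' h
          simp at this ⊢
          exact this

theorem pvFuse (ts : Int) (rest : List Int) (i : Int) :
    ∀ (gts : List (Int × Int)) (gs : List (List Int)),
    List.zipWith (fun (gt : Int × Int) (g : List Int) => g ++ pvRowB rest (i + 1) gt.1 gt.2) gts
        (List.zipWith (fun (gt : Int × Int) (g : List Int) => if ts ≥ gt.1 ∧ ts ≤ gt.2 then g ++ [i] else g) gts gs) =
      List.zipWith (fun gt g => g ++ pvRowB (ts :: rest) i gt.1 gt.2) gts gs := by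
  intro gts
  induction gts with
  | nil => intro gs; simp
  | cons gt gtl ih =>
      intro gs
      cases gs with
      | nil => simp
      | cons g gs' =>
          simp only [List.zipWith]
          rw [ih gs']
          congr 1
          by_cases hc : gt.1 ≤ ts ∧ ts ≤ gt.2
          · simp [pvRowB, hc]
          · simp [pvRowB, hc]

theorem pvOuterA_zip :
    ∀ (tss : List Int) (i : Int) (gts : List (Int × Int)) (gs : List (List Int)), gs.length = gts.length →
    pvOuterA tss gts gs i =
      List.zipWith (fun gt g => g ++ pvRowB tss i gt.1 gt.2) gts gs := by
  intro tss
  induction tss with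
  | nil =>
      intro i gts gs h
      simp only [pvOuterA, pvRowB]
      exact (zipWith_nilray gts gs h).symm
  | cons ts rest ih =>
      intro i gts gs h
      simp only [pvOuterA]
      have hinner := pvInnerA_zip ts i gts [] gs h
      simp only [List.nil_append, List.length_nil] at hinner
      rw [hinner, ih (i + 1) gts _ (by simp [h])]
      exact pvFuse ts rest i gts gs

-- ===== VERDICT (by name: the statement is the Claim_ definition above) =====
theorem get_group_indices_spec : Claim_equal_get_group_indices := by
  intro timestamps group_times hd
  clear hd
  unfold Spec_get_group_indices get_group_indices get_group_indices_alt
  rw [pvOuterA_zip timestamps 0 group_times _ (by simp)]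
  induction group_times with
  | nil => simp
  | cons gt rest ih => simp at ih ⊢; exact ih
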